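-- pv_equiv track=rewrite | github.com/Andromeda98/PythonEjerciciosRepaso | Ejercicios Python/Ejercicios Python/EjerciciosdeRepaso1ev/Ejercicio11.py | segundo_mas_largo
-- ===== SOURCE A (Python) =====
-- def segundo_mas_largo(strings):
--     if len(strings) < 2:
--         return "El array debe tener al menos 2 elementos"
--
--     # Inicializamos: ninguno encontrado aún
--     mas_largo = ""
--     segundo = ""
--
--     for palabra in strings:
--         # Si es más largo que el actual "mas_largo"
--         if len(palabra) > len(mas_largo):
--             # El más largo pasa a ser el segundo
--             segundo = mas_largo
--             # Y actualizamos el más largo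
--             mas_largo = palabra
--
--         # Si no es el más largo, pero sí más largo que el "segundo"
--         elif len(palabra) > len(segundo):
--             segundo = palabra
--
--     return segundo
-- ===== SOURCE B (Python) =====
-- def segundo_mas_largo(strings):
--     if len(strings) < 2:
--         return "El array debe tener al menos 2 elementos"
--     # first longest (max with key=len returns the FIRST maximal element)
--     mas_largo = max(strings, key=len)
--     resto = list(strings)
--     resto.remove(mas_largo)          # drop its first occurrence
--     return max(resto, key=len)       # first longest of the rest
-- ===== Notes on version B (the rewrite author's own statement) =====
-- stated objective: simpler
-- what changed: Replaces the two-variable tracking loop by two declarative passes: take the first longest string with max(key=len), remove its first occurrence, and take the first longest of the rest.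
import Mathlib
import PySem

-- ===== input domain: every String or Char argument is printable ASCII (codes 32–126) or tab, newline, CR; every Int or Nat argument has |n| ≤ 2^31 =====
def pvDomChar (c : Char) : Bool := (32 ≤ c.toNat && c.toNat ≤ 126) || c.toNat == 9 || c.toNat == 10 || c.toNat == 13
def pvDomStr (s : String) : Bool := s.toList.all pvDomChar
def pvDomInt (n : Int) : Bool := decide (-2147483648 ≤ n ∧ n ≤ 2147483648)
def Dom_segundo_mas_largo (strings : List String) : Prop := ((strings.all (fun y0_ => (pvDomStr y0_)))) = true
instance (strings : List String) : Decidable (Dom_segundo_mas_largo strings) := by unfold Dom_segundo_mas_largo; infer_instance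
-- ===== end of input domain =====

-- B replaces A's two-variable tracking loop by two declarative passes (first max by length,
-- remove its first occurrence, max of the rest); objective: simpler, same O(n) cost.

-- ===== PORT A =====
def segundo_mas_largo (strings : List String) : String :=
  if strings.length < 2 then "El array debe tener al menos 2 elementos"
  else
    (strings.foldl
      (fun (st : String × String) palabra =>
        if PySem.Str.len palabra > PySem.Str.len st.1 then (palabra, st.1)
        else if PySem.Str.len palabra > PySem.Str.len st.2 then (st.1, palabra)
        else st)
      ("", "")).2

-- ===== PORT B =====
def segundo_mas_largo_alt (strings : List String) : String :=
  if strings.length < 2 then "El array debe tener al menos 2 elementos"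
  else
    match PySem.List.max? strings PySem.Str.len with
    | none => ""  -- unreachable: strings has ≥ 2 elements
    | some mas_largo =>
      match PySem.List.remove? strings mas_largo with
      | none => ""  -- unreachable: mas_largo ∈ strings
      | some resto =>
        match PySem.List.max? resto PySem.Str.len with
        | none => ""  -- unreachable: resto has ≥ 1 element
        | some s => s

-- ===== PRECONDITION & SPEC =====
def Spec_segundo_mas_largo (strings : List String) (out : String) : Prop := out = segundo_mas_largo_alt strings
instance (strings : List String) (out : String) : Decidable (Spec_segundo_mas_largo strings out) := by unfold Spec_segundo_mas_largo; infer_instance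

-- ===== CLAIM (what is proved, stated in full; the proofs are below) =====
def Claim_equal_segundo_mas_largo : Prop := ∀ (strings : List String), Dom_segundo_mas_largo strings → Spec_segundo_mas_largo strings (segundo_mas_largo strings)

-- ===== LEMMAS AND PROOFS =====

-- M l = first longest element of l ("" if l = []); E l = l with the first occurrence of M l
-- removed; S l = first longest element of E l.
def pvM (l : List String) : String := (PySem.List.max? l PySem.Str.len).getD ""
def pvE (l : List String) : List String := (PySem.List.remove? l (pvM l)).getD []
def pvS (l : List String) : String := (PySem.List.max? (pvE l) PySem.Str.len).getD ""

def pvMaxF (k : String → ℤ) (acc : Option String) (y : String) : Option String :=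
  match acc with
  | none => some y
  | some m => if k m < k y then some y else some m

lemma max?_eq_foldl (l : List String) (k : String → ℤ) :
    PySem.List.max? l k = l.foldl (pvMaxF k) none := by
  unfold PySem.List.max?
  generalize (none : Option String) = a
  induction l generalizing a with
  | nil => rfl
  | cons b t ih =>
    simp only [List.foldl_cons]
    rw [ih]
    congr 1
    cases a with
    | none => rfl
    | some m =>
      show (if k m < k b then some b else some m) = pvMaxF k (some m) b
      by_cases hc : k m < k b
      · rw [if_pos hc]
        show _ = (if k m < k b then some b else some m)
        rw [if_pos hc]
      · rw [if_neg hc]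
        show _ = (if k m < k b then some b else some m)
        rw [if_neg hc]

lemma max?_snoc_some (l : List String) (x : String) (k : String → ℤ) (m : String)
    (h : PySem.List.max? l k = some m) :
    PySem.List.max? (l ++ [x]) k = some (if k m < k x then x else m) := by
  rw [max?_eq_foldl, List.foldl_append, ← max?_eq_foldl, h]
  simp only [List.foldl_cons, List.foldl_nil, pvMaxF]
  by_cases hc : k m < k x <;> simp [hc]

lemma remove?_snoc_mem (l : List String) (x v : String) (hv : v ∈ l) :
    PySem.List.remove? (l ++ [x]) v = (PySem.List.remove? l v).map (· ++ [x]) := by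
  induction l with
  | nil => cases hv
  | cons a t ih =>
    by_cases hav : a = v
    · subst hav
      simp [PySem.List.remove?_cons_self]
    · have hvt : v ∈ t := by
        rcases List.mem_cons.mp hv with h | h
        · exact absurd h.symm hav
        · exact h
      rw [List.cons_append, PySem.List.remove?_cons_of_ne _ hav,
        PySem.List.remove?_cons_of_ne _ hav, ih hvt]
      cases PySem.List.remove? t v <;> rfl

lemma remove?_snoc_self (l : List String) (x : String) (hx : x ∉ l) :
    PySem.List.remove? (l ++ [x]) x = some l := by
  induction l with
  | nil => simp [PySem.List.remove?_cons_self x []]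
  | cons a t ih =>
    have hax : a ≠ x := fun h => hx (h ▸ List.mem_cons_self)
    rw [List.cons_append, PySem.List.remove?_cons_of_ne _ hax,
      ih (fun h => hx (List.mem_cons_of_mem _ h))]
    rfl

lemma len_nonneg (s : String) : 0 ≤ PySem.Str.len s := by
  simp [PySem.Str.len]

lemma eq_empty_of_len_le_zero (s : String) (h : PySem.Str.len s ≤ 0) : s = "" := by
  have := len_nonneg s
  have hz : PySem.Str.len s = 0 := le_antisymm h this
  simp [PySem.Str.len] at hz
  exact hz

lemma tracker_eq (l : List String) (hne : l ≠ []) :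
    l.foldl
      (fun (st : String × String) palabra =>
        if PySem.Str.len palabra > PySem.Str.len st.1 then (palabra, st.1)
        else if PySem.Str.len palabra > PySem.Str.len st.2 then (st.1, palabra)
        else st)
      ("", "") = (pvM l, pvS l) := by
  induction l using List.reverseRecOn with
  | nil => exact absurd rfl hne
  | append_singleton t x ih =>
    by_cases ht : t = []
    · subst ht
      have hM : pvM [x] = x := by simp [pvM, PySem.List.max?]
      have hS : pvS [x] = "" := by
        simp [pvS, pvE, hM, PySem.List.remove?_cons_self, PySem.List.max?]
      simp only [List.nil_append, List.foldl_cons, List.foldl_nil, hM, hS, gt_iff_lt]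
      split_ifs with h1
      · rfl
      · have h0 : PySem.Str.len "" = 0 := by simp [PySem.Str.len]
        rw [h0] at h1
        have hx0 : x = "" := eq_empty_of_len_le_zero x (not_lt.mp h1)
        rw [hx0]
    · have IH := ih ht
      rw [List.foldl_append, IH]
      obtain ⟨m, hm⟩ : ∃ m, PySem.List.max? t PySem.Str.len = some m := by
        cases h : PySem.List.max? t PySem.Str.len with
        | none => exact absurd ((PySem.List.max?_eq_none_iff t _).1 h) ht
        | some m => exact ⟨m, rfl⟩
      have hpvMt : pvM t = m := by simp [pvM, hm]
      have hmmem : m ∈ t := PySem.List.max?_mem hm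
      have hmax : ∀ y ∈ t, PySem.Str.len y ≤ PySem.Str.len m := PySem.List.max?_isMax hm
      have hsnoc := max?_snoc_some t x PySem.Str.len m hm
      by_cases hgt : PySem.Str.len m < PySem.Str.len x
      · -- the new element becomes the longest, the old longest becomes second
        have hxnot : x ∉ t := fun hxin => absurd (hmax x hxin) (not_le.mpr hgt)
        have hM : pvM (t ++ [x]) = x := by
          unfold pvM
          rw [hsnoc]
          show (if PySem.Str.len m < PySem.Str.len x then x else m) = x
          rw [if_pos hgt]
        have hE : pvE (t ++ [x]) = t := by
          simp [pvE, hM, remove?_snoc_self t x hxnot]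
        have hS : pvS (t ++ [x]) = pvM t := by simp [pvS, hE, pvM]
        simp only [List.foldl_cons, List.foldl_nil, hM, hS, hpvMt]
        split_ifs <;> rfl
      · -- the longest is unchanged; the second is updated if x beats it
        have hM : pvM (t ++ [x]) = m := by
          unfold pvM
          rw [hsnoc]
          show (if PySem.Str.len m < PySem.Str.len x then x else m) = m
          rw [if_neg hgt]
        have hr := PySem.List.remove?_eq_some_erase t m hmmem
        have hE : pvE (t ++ [x]) = pvE t ++ [x] := by
          simp [pvE, hM, hpvMt, remove?_snoc_mem t x m hmmem, hr]
        have hS : pvS (t ++ [x]) =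
            if PySem.Str.len (pvS t) < PySem.Str.len x then x else pvS t := by
          cases hEt : PySem.List.max? (pvE t) PySem.Str.len with
          | none =>
            have hEnil : pvE t = [] := (PySem.List.max?_eq_none_iff _ _).1 hEt
            have hSt : pvS t = "" := by simp [pvS, hEt]
            rw [hSt]
            have hx1 : pvS (t ++ [x]) = x := by
              simp [pvS, hE, hEnil, PySem.List.max?]
            rw [hx1]
            by_cases hx : PySem.Str.len "" < PySem.Str.len x
            · simp
            · have : PySem.Str.len x ≤ 0 := by
                have h0 : PySem.Str.len "" = 0 := by simp [PySem.Str.len]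
                rw [h0] at hx; exact not_lt.mp hx
              have hx0 : x = "" := eq_empty_of_len_le_zero x this
              subst hx0; simp
          | some s =>
            have hsn := max?_snoc_some (pvE t) x PySem.Str.len s hEt
            have hSt : pvS t = s := by simp [pvS, hEt]
            rw [hSt]
            by_cases hc : PySem.Str.len s < PySem.Str.len x <;>
              simp [pvS, hE, hsn]
        simp only [List.foldl_cons, List.foldl_nil, hM, hS, hpvMt]
        split_ifs <;> first | rfl | (exfalso; omega)

-- ===== VERDICT (by name: the statement is the Claim_ definition above) =====
theorem segundo_mas_largo_spec : Claim_equal_segundo_mas_largo := by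
  intro l _
  unfold Spec_segundo_mas_largo segundo_mas_largo segundo_mas_largo_alt
  by_cases h2 : l.length < 2
  · simp [h2]
  · rw [if_neg h2, if_neg h2]
    have hlen : 2 ≤ l.length := not_lt.mp h2
    have hne : l ≠ [] := by
      intro h; subst h; simp at hlen
    rw [tracker_eq l hne]
    obtain ⟨m, hm⟩ : ∃ m, PySem.List.max? l PySem.Str.len = some m := by
      cases h : PySem.List.max? l PySem.Str.len with
      | none => exact absurd ((PySem.List.max?_eq_none_iff l _).1 h) hne
      | some m => exact ⟨m, rfl⟩
    have hmm : m ∈ l := PySem.List.max?_mem hm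
    have hr := PySem.List.remove?_eq_some_erase l m hmm
    simp only [hm, hr]
    cases hs : PySem.List.max? (l.erase m) PySem.Str.len with
    | none =>
      exfalso
      have hnil : l.erase m = [] := (PySem.List.max?_eq_none_iff _ _).1 hs
      have := List.length_erase_of_mem hmm
      rw [hnil] at this
      simp at this
      omega
    | some s =>
      simp [pvS, pvE, pvM, hm, hr, hs]
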